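-- pv_equiv track=rewrite | github.com/ZeroCreator/Projects | Tasks/PythonBoost_chat.py | harry
-- ===== SOURCE A (Python) =====
-- def harry(ls: list) -> int:
--     n = len(ls)
--     m = len(ls[0])
--     d = [[0 for i in range(m+1)] for j in range(n+1)]
--     for i in range(1, n+1):
--         for j in range(1, m+1):
--             d[i][j] = ls[i-1][j-1] + max(d[i-1][j], d[i][j-1])
--     maximum_result = d[-1][-1]
--     return -1 if maximum_result == 0 else maximum_result
-- ===== SOURCE B (Python) =====
-- def harry(ls: list) -> int:
--     n = len(ls)
--     m = len(ls[0])
--     memo = {}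
--
--     def best(i, j):
--         if i == 0 or j == 0:
--             return 0
--         v = memo.get((i, j))
--         if v is not None:
--             return v
--         v = ls[i - 1][j - 1] + max(best(i - 1, j), best(i, j - 1))
--         memo[(i, j)] = v
--         return v
--
--     result = best(n, m)
--     return -1 if result == 0 else result
-- ===== Notes on version B (the rewrite author's own statement) =====
-- stated objective: alternative
-- what changed: Replaces A's bottom-up nested-loop fill of an (n+1)x(m+1) table with a demand-driven top-down recursion best(i,j) memoized in a dict keyed by (i,j).
import Mathlib
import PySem

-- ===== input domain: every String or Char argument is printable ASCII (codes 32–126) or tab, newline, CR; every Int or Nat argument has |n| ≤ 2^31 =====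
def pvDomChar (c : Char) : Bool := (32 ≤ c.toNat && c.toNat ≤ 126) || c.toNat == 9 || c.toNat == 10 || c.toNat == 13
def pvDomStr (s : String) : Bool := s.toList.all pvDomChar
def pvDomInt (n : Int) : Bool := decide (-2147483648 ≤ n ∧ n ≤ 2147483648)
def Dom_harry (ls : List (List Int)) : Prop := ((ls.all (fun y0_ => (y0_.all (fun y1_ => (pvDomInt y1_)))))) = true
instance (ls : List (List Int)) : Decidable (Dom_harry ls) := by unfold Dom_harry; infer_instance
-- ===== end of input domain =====

-- B replaces A's bottom-up nested-loop fill of an (n+1)×(m+1) table with a demand-driven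
-- top-down recursion best(i,j) memoized in a dict; same results, objective: alternative.

-- ===== PORT A =====
-- A-side helpers: 2-D table read/write, exact on the in-range indices A uses
def pvGet2 (d : List (List Int)) (i j : Nat) : Int := (d.getD i []).getD j 0
def pvSet2 (d : List (List Int)) (i j : Nat) (v : Int) : List (List Int) :=
  d.set i ((d.getD i []).set j v)

def harry (ls : List (List Int)) : Int :=
  let n := ls.length
  let m := (ls.headD []).length          -- len(ls[0]); Pre_harry excludes ls = [] (IndexError)
  let d0 := List.replicate (n+1) (List.replicate (m+1) (0 : Int))
  let d := (List.range' 1 n).foldl (fun d i =>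
      (List.range' 1 m).foldl (fun d j =>
        pvSet2 d i j ((ls.getD (i-1) []).getD (j-1) 0
          + max (pvGet2 d (i-1) j) (pvGet2 d i (j-1)))) d) d0
  -- d[-1][-1]: d and its rows are always nonempty, so last-element access is exact
  let maximum_result := (d.getLast?.getD []).getLast?.getD 0
  if maximum_result = 0 then -1 else maximum_result

-- ===== PORT B =====
-- B-side helper: Source B's inner function best(i, j), threading the memo dict through the
-- recursion (memo.get((i,j)) hit returns it; miss recurses and inserts).
def pvBest (ls : List (List Int)) :
    Nat → Nat → PySem.Dict (Nat × Nat) Int → Int × PySem.Dict (Nat × Nat) Int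
  | i, j, memo =>
    if _h : i = 0 ∨ j = 0 then (0, memo)
    else
      match memo.get? (i, j) with
      | some v => (v, memo)
      | none =>
        let p1 := pvBest ls (i-1) j memo
        let p2 := pvBest ls i (j-1) p1.2
        let v := (ls.getD (i-1) []).getD (j-1) 0 + max p1.1 p2.1
        (v, p2.2.insert (i, j) v)
termination_by i j _ => i + j
decreasing_by all_goals omega

def harry_alt (ls : List (List Int)) : Int :=
  let n := ls.length
  let m := (ls.headD []).length          -- len(ls[0]); Pre_harry excludes ls = [] (IndexError)
  let result := (pvBest ls n m PySem.Dict.empty).1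
  if result = 0 then -1 else result

-- ===== PRECONDITION & SPEC =====
-- Pre_ excludes exactly the inputs where A raises IndexError: the empty list (ls[0]) and
-- grids with a row shorter than the first row (ls[i-1][j-1]).
def Pre_harry (ls : List (List Int)) : Prop :=
  ls ≠ [] ∧ ∀ row ∈ ls, (ls.headD []).length ≤ row.length
instance (ls : List (List Int)) : Decidable (Pre_harry ls) := by unfold Pre_harry; infer_instance

def pvWitness_harry : List (List Int) := [[1, 2], [3, 4]]

def Spec_harry (ls : List (List Int)) (out : Int) : Prop := out = harry_alt ls
instance (ls : List (List Int)) (out : Int) : Decidable (Spec_harry ls out) := by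
  unfold Spec_harry; infer_instance

-- ===== CLAIM (what is proved, stated in full; the proofs are below) =====
def Claim_equal_harry : Prop :=
  ∀ (ls : List (List Int)), Dom_harry ls → Pre_harry ls → Spec_harry ls (harry ls)

-- ===== LEMMAS AND PROOFS =====

-- the mathematical recurrence both programs compute
def pvF (ls : List (List Int)) : Nat → Nat → Int
  | 0, _ => 0
  | _+1, 0 => 0
  | i+1, j+1 => (ls.getD i []).getD j 0 + max (pvF ls i (j+1)) (pvF ls (i+1) j)
termination_by i j => i + j

lemma pvF_zero_left (ls : List (List Int)) (j : Nat) : pvF ls 0 j = 0 := by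
  cases j <;> simp [pvF]

lemma pvF_zero_right (ls : List (List Int)) (i : Nat) : pvF ls i 0 = 0 := by
  cases i <;> simp [pvF]

-- ==== B side: the memoized recursion computes pvF ====

def pvInv (ls : List (List Int)) (memo : PySem.Dict (Nat × Nat) Int) : Prop :=
  ∀ i j v, memo.get? (i, j) = some v → v = pvF ls i j

lemma pvBest_correct (ls : List (List Int)) :
    ∀ (c i j : Nat) (memo : PySem.Dict (Nat × Nat) Int), i + j ≤ c → pvInv ls memo →
      (pvBest ls i j memo).1 = pvF ls i j ∧ pvInv ls (pvBest ls i j memo).2 := by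
  intro c
  induction c with
  | zero =>
    intro i j memo hc hinv
    have hi : i = 0 := by omega
    have hj : j = 0 := by omega
    subst hi; subst hj
    rw [pvBest]
    simp [pvF]
    exact hinv
  | succ c ih =>
    intro i j memo hc hinv
    rw [pvBest]
    by_cases h : i = 0 ∨ j = 0
    · rw [dif_pos h]
      constructor
      · rcases h with h | h <;> subst h <;>
          simp [pvF_zero_left, pvF_zero_right]
      · exact hinv
    · rw [dif_neg h]
      cases hg : memo.get? (i, j) with
      | some v =>
        exact ⟨hinv i j v hg, hinv⟩
      | none =>
        have h1 := ih (i-1) j memo (by omega) hinv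
        have h2 := ih i (j-1) (pvBest ls (i-1) j memo).2 (by omega) h1.2
        obtain ⟨i', rfl⟩ : ∃ i', i = i' + 1 := ⟨i - 1, by omega⟩
        obtain ⟨j', rfl⟩ : ∃ j', j = j' + 1 := ⟨j - 1, by omega⟩
        simp only [Nat.add_sub_cancel] at h1 h2 ⊢
        constructor
        · rw [h1.1, h2.1]
          simp [pvF]
        · intro a b w hw
          rw [PySem.Dict.get?_insert] at hw
          by_cases hab : (a, b) = (i' + 1, j' + 1)
          · rw [if_pos hab] at hw
            obtain ⟨rfl, rfl⟩ := Prod.mk.injEq .. ▸ hab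
            have : w = (ls.getD i' []).getD j' 0 + max (pvBest ls i' (j'+1) memo).1
                (pvBest ls (i'+1) j' (pvBest ls i' (j'+1) memo).2).1 := by
              simpa using hw.symm
            rw [this, h1.1, h2.1]
            simp [pvF]
          · rw [if_neg hab] at hw
            exact h2.2 a b w hw

-- ==== A side: the table fill computes pvF, row by row ====

-- row k of the DP (without A's leading border 0)
def pvStep : List Int → List Int → Int → List Int
  | [], _, _ => []
  | _ :: _, [], _ => []
  | u :: us, x :: xs, left =>
    (x + max u left) :: pvStep us xs (x + max u left)

def pvRows (ls : List (List Int)) (m : Nat) : Nat → List Int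
  | 0 => List.replicate m 0
  | k+1 => pvStep (pvRows ls m k) (ls.getD k []) 0

lemma pvStep_length (us xs : List Int) (left : Int) :
    (pvStep us xs left).length = min us.length xs.length := by
  induction us generalizing xs left with
  | nil => simp [pvStep]
  | cons u us ih =>
    cases xs with
    | nil => simp [pvStep]
    | cons x xs =>
      simp [pvStep, ih]

lemma pvRows_length (ls : List (List Int)) (m : Nat)
    (hm : ∀ row ∈ ls, m ≤ row.length) (k : Nat) (hk : k ≤ ls.length) :
    (pvRows ls m k).length = m := by
  induction k with
  | zero => simp [pvRows]
  | succ k ih =>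
    have hk' : k < ls.length := by omega
    have hrow : ls.getD k [] = ls[k] := List.getD_eq_getElem ls [] hk'
    have hmem : ls[k] ∈ ls := List.getElem_mem hk'
    have : m ≤ (ls.getD k []).length := by rw [hrow]; exact hm _ hmem
    rw [pvRows, pvStep_length, ih (by omega)]
    omega

lemma pvStep_getD (us xs : List Int) (left : Int) (t : Nat)
    (h1 : t < us.length) (h2 : t < xs.length) :
    (pvStep us xs left).getD t 0 =
      xs.getD t 0 + max (us.getD t 0)
        (match t with | 0 => left | t'+1 => (pvStep us xs left).getD t' 0) := by
  induction us generalizing xs left t with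
  | nil => simp at h1
  | cons u us ih =>
    cases xs with
    | nil => simp at h2
    | cons x xs =>
      cases t with
      | zero => simp [pvStep]
      | succ t' =>
        simp only [pvStep, List.getD_cons_succ]
        rw [ih xs (x + max u left) t' (by simpa using h1) (by simpa using h2)]
        cases t' with
        | zero => simp
        | succ t'' => simp

-- bridge: entry t of row k of the table is pvF (k, t+1)
lemma pvRows_getD_eq_pvF (ls : List (List Int)) (m : Nat)
    (hm : ∀ row ∈ ls, m ≤ row.length) (k : Nat) (hk : k ≤ ls.length) :
    ∀ t, t < m → (pvRows ls m k).getD t 0 = pvF ls k (t+1) := by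
  induction k with
  | zero =>
    intro t ht
    rw [pvF_zero_left]
    simp [pvRows, ht]
  | succ k ih =>
    have hk' : k < ls.length := by omega
    have hrl : (pvRows ls m k).length = m := pvRows_length ls m hm k (by omega)
    have hxl : m ≤ (ls.getD k []).length := by
      rw [List.getD_eq_getElem ls [] hk']
      exact hm _ (List.getElem_mem hk')
    intro t ht
    induction t with
    | zero =>
      rw [pvRows, pvStep_getD _ _ _ 0 (by omega) (by omega)]
      show (ls.getD k []).getD 0 0 + max ((pvRows ls m k).getD 0 0) 0 = _
      rw [ih (by omega) 0 ht]
      simp [pvF, pvF_zero_right]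
    | succ t' iht =>
      rw [pvRows, pvStep_getD _ _ _ (t'+1) (by omega) (by omega)]
      show (ls.getD k []).getD (t'+1) 0 + max ((pvRows ls m k).getD (t'+1) 0)
          ((pvStep (pvRows ls m k) (ls.getD k []) 0).getD t' 0) = _
      rw [ih (by omega) (t'+1) ht]
      rw [← pvRows]
      rw [iht (by omega)]
      simp [pvF]

lemma getD_set_self (l : List (List Int)) (i : Nat) (a : List Int) (h : i < l.length) :
    (l.set i a).getD i [] = a := by
  simp [List.getD, h]

lemma getD_set_ne (l : List (List Int)) (i j : Nat) (a : List Int) (h : i ≠ j) :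
    (l.set i a).getD j [] = l.getD j [] := by
  simp [List.getD, List.getElem?_set_ne h]

lemma set_len_append (l1 l2 : List Int) (n : Nat) (v : Int) (h : n = l1.length) :
    (l1 ++ l2).set n v = l1 ++ l2.set 0 v := by
  subst h
  induction l1 with
  | nil => simp
  | cons a l1 ih => simp [ih]

lemma getD_append_left (l1 l2 : List Int) (n : Nat) (h : n < l1.length) :
    (l1 ++ l2).getD n 0 = l1.getD n 0 := by
  simp [List.getD, List.getElem?_append_left h]

lemma getD_take (l : List Int) (t n : Nat) (h : n < t) :
    (l.take t).getD n 0 = l.getD n 0 := by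
  simp [List.getD, h]

lemma take_succ_getD (l : List Int) (t : Nat) (h : t < l.length) :
    l.take (t+1) = l.take t ++ [l.getD t 0] := by
  rw [List.take_add_one, List.getElem?_eq_getElem h]
  simp [List.getD, List.getElem?_eq_getElem h]

lemma innerA (ls : List (List Int)) (m : Nat)
    (hm : ∀ row ∈ ls, m ≤ row.length) (i : Nat) (hi1 : 1 ≤ i) (hin : i ≤ ls.length) :
    ∀ (c t : Nat) (d : List (List Int)), t + c = m →
    d.length = ls.length + 1 →
    (∀ k, k ≤ ls.length → k ≠ i →
      d.getD k [] = if k < i then 0 :: pvRows ls m k else List.replicate (m+1) 0) →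
    d.getD i [] = 0 :: ((pvRows ls m i).take t ++ List.replicate (m - t) 0) →
    (let res := (List.range' (t+1) c).foldl (fun d j =>
        pvSet2 d i j ((ls.getD (i-1) []).getD (j-1) 0
          + max (pvGet2 d (i-1) j) (pvGet2 d i (j-1)))) d
     res.length = ls.length + 1 ∧
     (∀ k, k ≤ ls.length → k ≠ i →
       res.getD k [] = if k < i then 0 :: pvRows ls m k else List.replicate (m+1) 0) ∧
     res.getD i [] = 0 :: pvRows ls m i) := by
  obtain ⟨i', rfl⟩ : ∃ i', i = i' + 1 := ⟨i - 1, by omega⟩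
  intro c
  induction c generalizing i' with
  | zero =>
    intro t d ht hlen hoth hrow
    have htm : t = m := by omega
    dsimp only
    rw [List.range'_zero, List.foldl_nil]
    refine ⟨hlen, hoth, ?_⟩
    rw [hrow, htm]
    have hl := pvRows_length ls m hm (i'+1) hin
    have htk : List.take m (pvRows ls m (i'+1)) = pvRows ls m (i'+1) :=
      List.take_of_length_le (by omega)
    rw [htk, Nat.sub_self, List.replicate_zero, List.append_nil]
  | succ c ih =>
    intro t d ht hlen hoth hrow
    have htm : t < m := by omega
    have hrl : (pvRows ls m (i'+1)).length = m := pvRows_length ls m hm _ hin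
    have hrl' : (pvRows ls m i').length = m := pvRows_length ls m hm _ (by omega)
    have hil : i' < ls.length := by omega
    have hxl : m ≤ (ls.getD i' []).length := by
      rw [List.getD_eq_getElem ls [] hil]
      exact hm _ (List.getElem_mem hil)
    have hprev : d.getD i' [] = 0 :: pvRows ls m i' := by
      have := hoth i' (by omega) (by omega)
      simpa using this
    have hup : pvGet2 d i' (t+1) = (pvRows ls m i').getD t 0 := by
      simp only [pvGet2]
      rw [hprev, List.getD_cons_succ]
    have hleft : pvGet2 d (i'+1) t =
        (match t with | 0 => (0:Int) | t''+1 => (pvRows ls m (i'+1)).getD t'' 0) := by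
      cases t with
      | zero =>
        simp only [pvGet2]
        rw [hrow, List.getD_cons_zero]
      | succ t'' =>
        simp only [pvGet2]
        rw [hrow, List.getD_cons_succ]
        rw [getD_append_left _ _ t'' (by simp; omega)]
        exact getD_take _ _ _ (by omega)
    have hval : (ls.getD i' []).getD t 0 + max (pvGet2 d i' (t+1)) (pvGet2 d (i'+1) t)
        = (pvRows ls m (i'+1)).getD t 0 := by
      rw [hup, hleft]
      simp only [pvRows]
      rw [pvStep_getD _ _ _ t (by rw [hrl']; omega) (by omega)]
      cases t <;> simp
    dsimp only
    rw [List.range'_succ, List.foldl_cons]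
    simp only [Nat.add_sub_cancel]
    have hset : pvSet2 d (i'+1) (t+1)
          ((ls.getD i' []).getD t 0 + max (pvGet2 d i' (t+1)) (pvGet2 d (i'+1) t))
        = pvSet2 d (i'+1) (t+1) ((pvRows ls m (i'+1)).getD t 0) := by rw [hval]
    rw [hset]
    have hi1len : i' + 1 < d.length := by omega
    have hlen' : (pvSet2 d (i'+1) (t+1) ((pvRows ls m (i'+1)).getD t 0)).length
        = ls.length + 1 := by simp [pvSet2, hlen]
    have hoth' : ∀ k, k ≤ ls.length → k ≠ i' + 1 →
        (pvSet2 d (i'+1) (t+1) ((pvRows ls m (i'+1)).getD t 0)).getD k []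
          = if k < i' + 1 then 0 :: pvRows ls m k else List.replicate (m+1) 0 := by
      intro k hk hki
      rw [pvSet2, getD_set_ne _ _ _ _ (fun h => hki h.symm)]
      exact hoth k hk hki
    have hrow' : (pvSet2 d (i'+1) (t+1) ((pvRows ls m (i'+1)).getD t 0)).getD (i'+1) []
        = 0 :: ((pvRows ls m (i'+1)).take (t+1) ++ List.replicate (m - (t+1)) 0) := by
      rw [pvSet2, getD_set_self _ _ _ hi1len, hrow]
      have hmt : m - t = (m - (t+1)) + 1 := by omega
      rw [hmt, List.replicate_succ, List.set_cons_succ]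
      have htk : (List.take t (pvRows ls m (i'+1))).length = t := by simp; omega
      rw [set_len_append _ _ _ _ htk.symm, List.set_cons_zero]
      rw [take_succ_getD _ _ (by omega : t < (pvRows ls m (i'+1)).length), List.append_assoc]
      rfl
    have := ih i' hi1 hin (t+1) _ (by omega) hlen' hoth' hrow'
    exact this

lemma outerA (ls : List (List Int)) (m : Nat)
    (hm : ∀ row ∈ ls, m ≤ row.length) :
    ∀ (c i : Nat) (d : List (List Int)), i + c = ls.length →
    d.length = ls.length + 1 →
    (∀ k, k ≤ ls.length →
      d.getD k [] = if k ≤ i then 0 :: pvRows ls m k else List.replicate (m+1) 0) →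
    (let res := (List.range' (i+1) c).foldl (fun d i =>
        (List.range' 1 m).foldl (fun d j =>
          pvSet2 d i j ((ls.getD (i-1) []).getD (j-1) 0
            + max (pvGet2 d (i-1) j) (pvGet2 d i (j-1)))) d) d
     res.length = ls.length + 1 ∧
     (∀ k, k ≤ ls.length →
       res.getD k [] = if k ≤ ls.length then 0 :: pvRows ls m k
                       else List.replicate (m+1) 0)) := by
  intro c
  induction c with
  | zero =>
    intro i d hc hlen hinv
    dsimp only
    rw [List.range'_zero, List.foldl_nil]
    refine ⟨hlen, ?_⟩
    intro k hk
    rw [hinv k hk]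
    have : k ≤ i := by omega
    simp [this, hk]
  | succ c ih =>
    intro i d hc hlen hinv
    dsimp only
    rw [List.range'_succ, List.foldl_cons]
    have h0 : d.getD (i+1) [] =
        0 :: ((pvRows ls m (i+1)).take 0 ++ List.replicate (m - 0) 0) := by
      rw [hinv (i+1) (by omega)]
      simp [List.replicate_succ]
    have hoth0 : ∀ k, k ≤ ls.length → k ≠ i + 1 →
        d.getD k [] = if k < i + 1 then 0 :: pvRows ls m k else List.replicate (m+1) 0 := by
      intro k hk hki
      rw [hinv k hk]
      by_cases h : k ≤ i
      · simp [h, Nat.lt_succ_of_le h]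
      · have h1 : ¬ k < i + 1 := by omega
        simp [h, h1]
    have hinner := innerA ls m hm (i+1) (by omega) (by omega) m 0 d
      (by omega) hlen hoth0 h0
    obtain ⟨hl1, hother, hrowi⟩ := hinner
    refine ih (i+1) _ (by omega) hl1 ?_
    intro k hk
    by_cases hki : k = i + 1
    · subst hki
      rw [if_pos (le_refl (i+1))]
      exact hrowi
    · rw [hother k hk hki]
      by_cases h : k ≤ i + 1
      · have : k < i + 1 := by omega
        simp [this, h]
      · have h1 : ¬ k < i + 1 := by omega
        simp [h, h1]

-- ===== VERDICT (by name: the statement is the Claim_ definition above) =====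
theorem harry_spec : Claim_equal_harry := by
  intro ls _ hpre
  obtain ⟨hne, hm⟩ := hpre
  unfold Spec_harry harry harry_alt
  dsimp only
  set m := (ls.headD []).length with hmdef
  -- B's side: the memoized recursion computes pvF
  have hB : (pvBest ls ls.length m PySem.Dict.empty).1 = pvF ls ls.length m := by
    have := pvBest_correct ls (ls.length + m) ls.length m PySem.Dict.empty (le_refl _)
      (by intro i j v hv; simp [PySem.Dict.get?_empty] at hv)
    exact this.1
  rw [hB]
  -- A's side: the filled table's rows are 0 :: pvRows
  have hinit : ∀ k, k ≤ ls.length →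
      (List.replicate (ls.length + 1) (List.replicate (m + 1) (0:Int))).getD k []
        = if k ≤ 0 then 0 :: pvRows ls m k
          else List.replicate (m + 1) 0 := by
    intro k hk
    have hk1 : k < ls.length + 1 := by omega
    rw [List.getD, List.getElem?_replicate]
    simp only [hk1, if_true]
    by_cases h : k ≤ 0
    · have : k = 0 := by omega
      subst this
      simp [pvRows, List.replicate_succ]
    · simp [h]
  have hout := outerA ls m hm ls.length 0
    (List.replicate (ls.length + 1) (List.replicate (m + 1) (0:Int)))
    (by omega) (by simp) hinit
  obtain ⟨hlen, hrows⟩ := hout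
  set res := (List.range' (0+1) ls.length).foldl (fun d i =>
      (List.range' 1 m).foldl (fun d j =>
        pvSet2 d i j ((ls.getD (i-1) []).getD (j-1) 0
          + max (pvGet2 d (i-1) j) (pvGet2 d i (j-1)))) d)
    (List.replicate (ls.length + 1) (List.replicate (m + 1) (0:Int))) with hres
  have hlast : res.getLast?.getD [] = 0 :: pvRows ls m ls.length := by
    rw [List.getLast?_eq_getElem?, hlen]
    have hlt : ls.length < res.length := by omega
    rw [Nat.add_sub_cancel, List.getElem?_eq_getElem hlt]
    have := hrows ls.length (le_refl _)
    simp only [le_refl, if_true] at this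
    rw [List.getD] at this
    rw [List.getElem?_eq_getElem hlt] at this
    simpa using this
  rw [hlast]
  -- last element of the last row is pvF n m
  have hfin : (0 :: pvRows ls m ls.length).getLast?.getD 0 = pvF ls ls.length m := by
    have hrl : (pvRows ls m ls.length).length = m := pvRows_length ls m hm _ (le_refl _)
    cases h : pvRows ls m ls.length with
    | nil =>
      have hm0 : m = 0 := by rw [h] at hrl; simpa using hrl.symm
      rw [hm0, pvF_zero_right]
      rfl
    | cons a l =>
      rw [List.getLast?_cons_cons]
      have hm0 : 0 < m := by rw [h] at hrl; simp at hrl; omega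
      have hbr := pvRows_getD_eq_pvF ls m hm ls.length (le_refl _) (m-1) (by omega)
      rw [Nat.sub_add_cancel hm0] at hbr
      rw [← hbr, h]
      rw [List.getLast?_eq_getElem?]
      have hlen2 : (a :: l).length = m := by rw [← h, hrl]
      rw [hlen2]
      simp [List.getD]
  rw [hfin]
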